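-- pv_equiv track=rewrite | github.com/EstefanoTerenghiGoy/UTN | Modelo Parcial.py | recorrer_columnas
-- ===== SOURCE A (Python) =====
-- def recorrer_columnas(matriz):
--     numero_encontrado = None
--     contador_columnas = 0
--     columnas = []
--     for i in range(len(matriz)):
--         columna = []
--         for j in range(len(matriz)):
--             columna.append(matriz[j][contador_columnas])
--         columnas.append(columna)
--         contador_columnas+=1
--     #Hasta aca
--
--
--     for i in range(len(columnas)):
--         for j in range(len(columnas[i]) - 2):
--             if columnas[i][j] == columnas[i][j+1] and columnas[i][j] == columnas[i][j+2]:
--                 numero_encontrado = columnas[i][j]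
--     return numero_encontrado
-- ===== SOURCE B (Python) =====
-- def recorrer_columnas(matriz):
--     numero_encontrado = None
--     for i in range(len(matriz)):
--         prev = None
--         run = 0
--         for fila in matriz:
--             v = fila[i]
--             if run > 0 and prev == v:
--                 run += 1
--             else:
--                 prev = v
--                 run = 1
--             if run >= 3:
--                 numero_encontrado = v
--     return numero_encontrado
-- ===== Notes on version B (the rewrite author's own statement) =====
-- stated objective: simpler
-- what changed: Drops the transpose-building phase and the three-way index test columnas[i][j]==columnas[i][j+1]==columnas[i][j+2]: B walks each column once over the rows with a run-length state machine (prev, run) and records the value whenever the run reaches 3.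
import Mathlib
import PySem

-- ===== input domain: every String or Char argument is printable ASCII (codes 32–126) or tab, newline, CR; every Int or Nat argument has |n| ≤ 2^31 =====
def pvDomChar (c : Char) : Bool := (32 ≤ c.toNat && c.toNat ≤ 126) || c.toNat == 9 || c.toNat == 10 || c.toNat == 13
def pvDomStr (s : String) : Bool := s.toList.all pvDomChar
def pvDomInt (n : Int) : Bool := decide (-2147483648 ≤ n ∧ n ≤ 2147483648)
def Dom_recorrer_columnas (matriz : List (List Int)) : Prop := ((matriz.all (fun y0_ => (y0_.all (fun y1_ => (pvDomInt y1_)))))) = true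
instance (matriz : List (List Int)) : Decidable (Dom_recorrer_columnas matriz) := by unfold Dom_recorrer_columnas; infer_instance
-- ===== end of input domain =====

-- B drops A's transpose-building pass and three-way index test, scanning each column once
-- with a run-length state machine (objective: simpler; no auxiliary transposed copy).

-- ===== PORT A =====
def recorrer_columnas (matriz : List (List Int)) : Option Int :=
  let n : Int := matriz.length
  -- first phase: build `columnas`, the list of columns, tracking `contador_columnas` in the state
  let st :=
    (PySem.List.pyRange 0 n 1).foldl
      (fun (st : List (List Int) × Int) _i =>
        let columna :=
          (PySem.List.pyRange 0 n 1).foldl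
            (fun (col : List Int) j =>
              col ++ [PySem.List.pyGetD (PySem.List.pyGetD matriz j []) st.2 0]) []
        (st.1 ++ [columna], st.2 + 1))
      ([], 0)
  let columnas := st.1
  -- second phase: scan every column for three consecutive equal values, last match wins
  (PySem.List.pyRange 0 (columnas.length : Int) 1).foldl
    (fun (found : Option Int) i =>
      let ci := PySem.List.pyGetD columnas i []
      (PySem.List.pyRange 0 ((ci.length : Int) - 2) 1).foldl
        (fun (found : Option Int) j =>
          if PySem.List.pyGetD ci j 0 = PySem.List.pyGetD ci (j + 1) 0 ∧
             PySem.List.pyGetD ci j 0 = PySem.List.pyGetD ci (j + 2) 0 then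
            some (PySem.List.pyGetD ci j 0)
          else found)
        found)
    none

-- ===== PORT B =====
-- state: (numero_encontrado, prev, run); one step of Source B's inner row loop for column i
def pvRunStep (i : Int) (s : Option Int × Option Int × Int) (fila : List Int) :
    Option Int × Option Int × Int :=
  let v := PySem.List.pyGetD fila i 0
  let pr : Option Int × Int :=
    if 0 < s.2.2 ∧ s.2.1 = some v then (s.2.1, s.2.2 + 1) else (some v, 1)
  ((if 3 ≤ pr.2 then some v else s.1), pr.1, pr.2)

def recorrer_columnas_alt (matriz : List (List Int)) : Option Int :=
  (PySem.List.pyRange 0 (matriz.length : Int) 1).foldl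
    (fun (found : Option Int) i =>
      (matriz.foldl (pvRunStep i) (found, none, 0)).1)
    none

-- ===== PRECONDITION & SPEC =====
-- Pre_ excludes exactly the inputs where Python A raises IndexError: some row shorter than
-- the number of rows (A indexes matriz[j][i] for all i, j < len(matriz)).
def Pre_recorrer_columnas (matriz : List (List Int)) : Prop :=
  ∀ fila ∈ matriz, matriz.length ≤ fila.length
instance (matriz : List (List Int)) : Decidable (Pre_recorrer_columnas matriz) := by
  unfold Pre_recorrer_columnas; infer_instance

def pvWitness_recorrer_columnas : List (List Int) := [[1, 2, 3], [1, 5, 6], [1, 8, 9]]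

def Spec_recorrer_columnas (matriz : List (List Int)) (out : Option Int) : Prop := out = recorrer_columnas_alt matriz
instance (matriz : List (List Int)) (out : Option Int) : Decidable (Spec_recorrer_columnas matriz out) := by unfold Spec_recorrer_columnas; infer_instance

-- ===== CLAIM (what is proved, stated in full; the proofs are below) =====
def Claim_equal_recorrer_columnas : Prop := ∀ (matriz : List (List Int)), Dom_recorrer_columnas matriz → Pre_recorrer_columnas matriz → Spec_recorrer_columnas matriz (recorrer_columnas matriz)

-- ===== LEMMAS AND PROOFS =====

-- the i-th column of the matrix (0 default never read on in-range indices)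
def pvColOf (matriz : List (List Int)) (i : Int) : List Int :=
  matriz.map (fun fila => PySem.List.pyGetD fila i 0)

-- structural "last triple of consecutive equal values" scan of one column
def pvLt3 : List Int → Option Int → Option Int
  | a :: b :: c :: rest, acc => pvLt3 (b :: c :: rest) (if a = b ∧ a = c then some a else acc)
  | _, acc => acc

-- value-level form of pvRunStep
def pvRunStepV (s : Option Int × Option Int × Int) (v : Int) : Option Int × Option Int × Int :=
  let pr : Option Int × Int :=
    if 0 < s.2.2 ∧ s.2.1 = some v then (s.2.1, s.2.2 + 1) else (some v, 1)
  ((if 3 ≤ pr.2 then some v else s.1), pr.1, pr.2)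

-- the run-length machine computes pvLt3, with context states
theorem pv_run_lt3 (c : List Int) :
    (∀ acc, (c.foldl pvRunStepV (acc, none, 0)).1 = pvLt3 c acc)
    ∧ (∀ acc p, (c.foldl pvRunStepV (acc, some p, 1)).1 = pvLt3 (p :: c) acc)
    ∧ (∀ acc p r, 2 ≤ r → (c.foldl pvRunStepV (acc, some p, r)).1 = pvLt3 (p :: p :: c) acc) := by
  induction c with
  | nil =>
    exact ⟨fun acc => rfl, fun acc p => rfl, fun acc p r _ => rfl⟩
  | cons v rest ih =>
    obtain ⟨iha, ihb, ihc⟩ := ih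
    refine ⟨?_, ?_, ?_⟩
    · intro acc
      have h : pvRunStepV (acc, none, 0) v = (acc, some v, 1) := by
        simp [pvRunStepV]
      rw [List.foldl_cons, h, ihb]
    · intro acc p
      by_cases hpv : p = v
      · subst hpv
        have h : pvRunStepV (acc, some p, 1) p = (acc, some p, 2) := by
          simp [pvRunStepV]
        rw [List.foldl_cons, h, ihc acc p 2 (by omega)]
      · have h : pvRunStepV (acc, some p, 1) v = (acc, some v, 1) := by
          simp [pvRunStepV, hpv]
        rw [List.foldl_cons, h, ihb]
        cases rest with
        | nil => simp [pvLt3]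
        | cons w t => simp [pvLt3, hpv]
    · intro acc p r hr
      by_cases hpv : p = v
      · subst hpv
        have h0 : 0 < r := by omega
        have h3 : (3:Int) ≤ r + 1 := by omega
        have h : pvRunStepV (acc, some p, r) p = (some p, some p, r + 1) := by
          simp [pvRunStepV, h0, h3]
        rw [List.foldl_cons, h, ihc (some p) p (r + 1) (by omega)]
        simp [pvLt3]
      · have h : pvRunStepV (acc, some p, r) v = (acc, some v, 1) := by
          simp [pvRunStepV, hpv]
        rw [List.foldl_cons, h, ihb]
        cases rest with
        | nil => simp [pvLt3, hpv]
        | cons w t => simp [pvLt3, hpv]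

-- A's index-triple fold over one column computes pvLt3
theorem pv_fA_lt3 (c : List Int) : ∀ acc : Option Int,
    (List.range (c.length - 2)).foldl
      (fun (acc : Option Int) j =>
        if c.getD j 0 = c.getD (j + 1) 0 ∧ c.getD j 0 = c.getD (j + 2) 0 then
          some (c.getD j 0)
        else acc) acc
    = pvLt3 c acc := by
  induction c with
  | nil => intro acc; simp [pvLt3]
  | cons a rest ih =>
    cases rest with
    | nil => intro acc; simp [pvLt3]
    | cons b rest2 =>
      cases rest2 with
      | nil => intro acc; simp [pvLt3]
      | cons d t =>
        intro acc
        have hlen : (a :: b :: d :: t).length - 2 = t.length + 1 := by simp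
        rw [hlen, List.range_succ_eq_map, List.foldl_cons, List.foldl_map]
        have hstep :
            (fun (acc : Option Int) (j : Nat) =>
              if (a :: b :: d :: t).getD (j + 1) 0 = (a :: b :: d :: t).getD (j + 1 + 1) 0 ∧
                 (a :: b :: d :: t).getD (j + 1) 0 = (a :: b :: d :: t).getD (j + 1 + 2) 0 then
                some ((a :: b :: d :: t).getD (j + 1) 0)
              else acc)
            = (fun (acc : Option Int) j =>
              if (b :: d :: t).getD j 0 = (b :: d :: t).getD (j + 1) 0 ∧
                 (b :: d :: t).getD j 0 = (b :: d :: t).getD (j + 2) 0 then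
                some ((b :: d :: t).getD j 0)
              else acc) := by
          funext acc j
          simp
        have hlen2 : t.length = (b :: d :: t).length - 2 := by simp
        simp only [Nat.succ_eq_add_one] at hstep ⊢
        rw [hstep, hlen2, ih]
        simp [pvLt3, List.getD]

-- phase 1 of A builds exactly the list of columns (state invariant on the counter)
theorem pv_phase1 (matriz : List (List Int)) (l : List Int) :
    ∀ (cols : List (List Int)) (k : Int),
      l.foldl
        (fun (st : List (List Int) × Int) _i =>
          (st.1 ++ [pvColOf matriz st.2], st.2 + 1)) (cols, k)
      = (cols ++ (List.range l.length).map (fun t : Nat => pvColOf matriz (k + (t : Int))),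
          k + (l.length : Int)) := by
  induction l with
  | nil => intro cols k; simp
  | cons x xs ih =>
    intro cols k
    rw [List.foldl_cons, ih]
    simp only [Prod.mk.injEq]
    constructor
    · rw [List.append_assoc, List.singleton_append, List.length_cons, List.range_succ_eq_map,
        List.map_cons, List.map_map]
      congr 1
      congr 1
      · simp
      · apply List.map_congr_left
        intro t _
        congr 1
        push_cast
        ring
    · simp only [List.length_cons]
      push_cast
      ring

-- A's inner per-column fold (Int indices over pyRange) computes pvLt3
theorem pv_inner (ci : List Int) (found : Option Int) :
    (PySem.List.pyRange 0 ((ci.length : Int) - 2) 1).foldl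
      (fun (found : Option Int) j =>
        if PySem.List.pyGetD ci j 0 = PySem.List.pyGetD ci (j + 1) 0 ∧
           PySem.List.pyGetD ci j 0 = PySem.List.pyGetD ci (j + 2) 0 then
          some (PySem.List.pyGetD ci j 0)
        else found) found
    = pvLt3 ci found := by
  rw [PySem.List.pyRange_one,
    show ((ci.length : Int) - 2 - 0).toNat = ci.length - 2 from by omega,
    List.foldl_map, ← pv_fA_lt3]
  apply List.foldl_ext
  intro acc k _
  have h3 : (0 : Int) + (k : Int) + 2 = ((k + 2 : Nat) : Int) := by push_cast; ring
  have h2 : (0 : Int) + (k : Int) + 1 = ((k + 1 : Nat) : Int) := by push_cast; ring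
  have h1 : (0 : Int) + (k : Int) = ((k : Nat) : Int) := by ring
  rw [h3, h2, h1]
  simp only [PySem.List.pyGetD_natCast]

theorem pv_claim : ∀ (matriz : List (List Int)),
    recorrer_columnas matriz = recorrer_columnas_alt matriz := by
  intro matriz
  simp only [recorrer_columnas, recorrer_columnas_alt]
  have hn : PySem.List.pyRange 0 (matriz.length : Int) 1
      = (List.range matriz.length).map (fun k : Nat => (k : Int)) := by
    rw [PySem.List.pyRange_one]
    simp only [sub_zero, Int.toNat_natCast, zero_add]
  -- A's column-building inner fold is pvColOf
  have hcol : ∀ k : Int,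
      (PySem.List.pyRange 0 (matriz.length : Int) 1).foldl
        (fun (col : List Int) j =>
          col ++ [PySem.List.pyGetD (PySem.List.pyGetD matriz j []) k 0]) []
      = pvColOf matriz k := by
    intro k
    have h := PySem.List.foldl_pyRange_zero_pyGetD' matriz ([] : List Int)
      (fun (col : List Int) (fila : List Int) => col ++ [PySem.List.pyGetD fila k 0])
      ([] : List Int)
    rw [h, PySem.List.foldl_append_singleton_eq_map]
    simp [pvColOf]
  -- phase 1 result: the transpose
  have hphase1 :
      (PySem.List.pyRange 0 (matriz.length : Int) 1).foldl
        (fun (st : List (List Int) × Int) _i =>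
          let columna :=
            (PySem.List.pyRange 0 (matriz.length : Int) 1).foldl
              (fun (col : List Int) j =>
                col ++ [PySem.List.pyGetD (PySem.List.pyGetD matriz j []) st.2 0]) []
          (st.1 ++ [columna], st.2 + 1)) ([], 0)
      = ((List.range matriz.length).map (fun t : Nat => pvColOf matriz (t : Int)),
          (matriz.length : Int)) := by
    have hf :
        (fun (st : List (List Int) × Int) (_i : Int) =>
          let columna :=
            (PySem.List.pyRange 0 (matriz.length : Int) 1).foldl
              (fun (col : List Int) j =>
                col ++ [PySem.List.pyGetD (PySem.List.pyGetD matriz j []) st.2 0]) []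
          (st.1 ++ [columna], st.2 + 1))
        = (fun (st : List (List Int) × Int) _i =>
            (st.1 ++ [pvColOf matriz st.2], st.2 + 1)) := by
      funext st i
      simp only [hcol st.2]
    rw [hf, pv_phase1 matriz _ [] 0]
    have hl : (PySem.List.pyRange 0 (matriz.length : Int) 1).length = matriz.length := by
      rw [PySem.List.length_pyRange_one]; simp
    rw [hl]
    simp
  rw [hphase1]
  -- phase 2 of A over the explicit transpose
  rw [PySem.List.foldl_pyRange_zero_pyGetD'
    ((List.range matriz.length).map (fun t : Nat => pvColOf matriz (t : Int)),
      (matriz.length : Int)).1 ([] : List Int)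
    (fun (found : Option Int) (ci : List Int) =>
      (PySem.List.pyRange 0 ((ci.length : Int) - 2) 1).foldl
        (fun (found : Option Int) j =>
          if PySem.List.pyGetD ci j 0 = PySem.List.pyGetD ci (j + 1) 0 ∧
             PySem.List.pyGetD ci j 0 = PySem.List.pyGetD ci (j + 2) 0 then
            some (PySem.List.pyGetD ci j 0)
          else found) found) none]
  rw [hn, List.foldl_map, List.foldl_map]
  apply List.foldl_ext
  intro found t _
  rw [pv_inner]
  have hB : matriz.foldl (pvRunStep (t : Int)) (found, none, 0)
      = (pvColOf matriz (t : Int)).foldl pvRunStepV (found, none, 0) := by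
    rw [pvColOf, List.foldl_map]
    rfl
  rw [hB]
  exact ((pv_run_lt3 (pvColOf matriz (t : Int))).1 found).symm

-- ===== VERDICT (by name: the statement is the Claim_ definition above) =====
theorem recorrer_columnas_spec : Claim_equal_recorrer_columnas := by
  intro matriz _ _
  unfold Spec_recorrer_columnas
  exact pv_claim matriz
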